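-- pv_equiv track=rewrite | github.com/loerei/Auto-Mudae | src/mudae/config/vars.py | _container_balanced
-- ===== SOURCE A (Python) =====
-- def _container_balanced(value: str) -> bool:
--     in_single = False
--     in_double = False
--     escaped = False
--     square = 0
--     curly = 0
--     for ch in value:
--         if escaped:
--             escaped = False
--             continue
--         if ch == "\\":
--             escaped = True
--             continue
--         if ch == "'" and not in_double:
--             in_single = not in_single
--             continue
--         if ch == '"' and not in_single:
--             in_double = not in_double
--             continue
--         if in_single or in_double:
--             continue
--         if ch == "[":
--             square += 1
--         elif ch == "]":
--             square -= 1
--         elif ch == "{":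
--             curly += 1
--         elif ch == "}":
--             curly -= 1
--     return square == 0 and curly == 0 and not in_single and not in_double
-- ===== SOURCE B (Python) =====
-- def _container_balanced(value: str) -> bool:
--     # B: index-based scanner with the quote state encoded in the call
--     # structure: on a quote char, a helper consumes the whole quoted region
--     # up to its closing quote; no in_single/in_double flags exist.
--     n = len(value)
--
--     def skip_quoted(i, q):
--         # i = index just after the opening quote q; return the index just
--         # after the matching closing quote, or None if unterminated.
--         while i < n:
--             c = value[i]
--             if c == "\\":
--                 i += 2
--             elif c == q:
--                 return i + 1
--             else:
--                 i += 1
--         return None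
--
--     square = 0
--     curly = 0
--     i = 0
--     while i < n:
--         c = value[i]
--         if c == "\\":
--             i += 2
--             continue
--         if c == "'" or c == '"':
--             j = skip_quoted(i + 1, c)
--             if j is None:
--                 return False  # unterminated quote
--             i = j
--             continue
--         if c == "[":
--             square += 1
--         elif c == "]":
--             square -= 1
--         elif c == "{":
--             curly += 1
--         elif c == "}":
--             curly -= 1
--         i += 1
--     return square == 0 and curly == 0
-- ===== Notes on version B (the rewrite author's own statement) =====
-- stated objective: alternative
-- what changed: B drops A's in_single/in_double/escaped flag machine entirely: an index-based outer loop counts brackets and, on a quote character, a helper consumes the whole quoted region up to its closing quote (returning early with False on an unterminated quote), so quote state lives in the call structure instead of flags.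
import Mathlib
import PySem

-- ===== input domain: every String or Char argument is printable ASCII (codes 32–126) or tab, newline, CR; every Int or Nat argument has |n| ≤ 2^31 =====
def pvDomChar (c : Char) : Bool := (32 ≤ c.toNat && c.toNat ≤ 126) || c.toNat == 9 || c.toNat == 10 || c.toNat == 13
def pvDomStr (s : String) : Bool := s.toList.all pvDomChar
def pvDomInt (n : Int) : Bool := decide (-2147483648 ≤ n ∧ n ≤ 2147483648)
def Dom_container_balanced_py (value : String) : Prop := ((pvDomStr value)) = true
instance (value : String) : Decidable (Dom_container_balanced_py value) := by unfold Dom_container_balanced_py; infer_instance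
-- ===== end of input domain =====

-- B replaces A's flag-based single state machine by a two-level scanner whose
-- helper consumes each quoted region wholesale (no quote/escape flags in the
-- outer loop); objective: alternative decomposition, same O(n) cost.


-- ===== PORT A =====
-- A: one loop keeping in_single/in_double/escaped flags and running deltas.
def aLoop : List Char → Bool → Bool → Bool → Int → Int → (Bool × Bool × Int × Int)
  | [], inS, inD, _, sq, cu => (inS, inD, sq, cu)
  | ch :: rest, inS, inD, esc, sq, cu =>
    if esc then aLoop rest inS inD false sq cu
    else if ch = '\\' then aLoop rest inS inD true sq cu
    else if ch = '\'' ∧ inD = false then aLoop rest (!inS) inD false sq cu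
    else if ch = '"' ∧ inS = false then aLoop rest inS (!inD) false sq cu
    else if inS = true ∨ inD = true then aLoop rest inS inD false sq cu
    else if ch = '[' then aLoop rest inS inD false (sq + 1) cu
    else if ch = ']' then aLoop rest inS inD false (sq - 1) cu
    else if ch = '{' then aLoop rest inS inD false sq (cu + 1)
    else if ch = '}' then aLoop rest inS inD false sq (cu - 1)
    else aLoop rest inS inD false sq cu

def container_balanced_py (value : String) : Bool :=
  let r := aLoop value.toList false false false 0 0
  r.2.2.1 == 0 && r.2.2.2 == 0 && !r.1 && !r.2.1

-- ===== PORT B =====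
-- B: skipQuoted consumes a whole quoted region (list after the opening quote
-- q), returning the remainder after the closing quote, or none if the quote
-- is unterminated. '\\' skips the escaped character (tail of the tail).
def skipQuoted : List Char → Char → Option (List Char)
  | [], _ => none
  | c :: rest, q =>
    if c = '\\' then skipQuoted rest.tail q
    else if c = q then some rest
    else skipQuoted rest q
termination_by l _ => l.length
decreasing_by all_goals (simp [List.length_tail]; try omega)

-- Needed for bOuter's termination (cited in its decreasing_by).
theorem skipQuoted_length_aux : ∀ (n : Nat) (l : List Char), l.length ≤ n →
    ∀ (q : Char) (r : List Char), skipQuoted l q = some r → r.length ≤ l.length := by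
  intro n
  induction n with
  | zero =>
    intro l hl q r h
    cases l with
    | nil => simp [skipQuoted] at h
    | cons c rest => simp at hl
  | succ n ih =>
    intro l hl q r h
    cases l with
    | nil => simp [skipQuoted] at h
    | cons c rest =>
      rw [skipQuoted] at h
      split_ifs at h with h1 h2
      · have h3 : rest.tail.length ≤ n := by
          have := rest.length_tail; simp at hl; omega
        have := ih rest.tail h3 q r h
        have := rest.length_tail
        simp; omega
      · cases h; simp
      · have h3 : rest.length ≤ n := by simp at hl; omega
        have := ih rest h3 q r h
        simp; omega

theorem skipQuoted_length (l : List Char) (q : Char) (r : List Char)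
    (h : skipQuoted l q = some r) : r.length ≤ l.length :=
  skipQuoted_length_aux l.length l le_rfl q r h

-- B's outer loop: counts brackets, jumps over escapes and quoted regions.
def bOuter : List Char → Int → Int → Bool
  | [], sq, cu => sq == 0 && cu == 0
  | c :: rest, sq, cu =>
    if c = '\\' then bOuter rest.tail sq cu
    else if c = '\'' ∨ c = '"' then
      match h : skipQuoted rest c with
      | none => false
      | some r => bOuter r sq cu
    else if c = '[' then bOuter rest (sq + 1) cu
    else if c = ']' then bOuter rest (sq - 1) cu
    else if c = '{' then bOuter rest sq (cu + 1)
    else if c = '}' then bOuter rest sq (cu - 1)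
    else bOuter rest sq cu
termination_by l _ _ => l.length
decreasing_by
  · simp [List.length_tail]
  · have := skipQuoted_length _ _ _ h; simp; omega
  all_goals simp

def container_balanced_py_alt (value : String) : Bool :=
  bOuter value.toList 0 0

-- ===== PRECONDITION & SPEC =====
def Spec_container_balanced_py (value : String) (out : Bool) : Prop := out = container_balanced_py_alt value
instance (value : String) (out : Bool) : Decidable (Spec_container_balanced_py value out) := by unfold Spec_container_balanced_py; infer_instance

-- ===== CLAIM (what is proved, stated in full; the proofs are below) =====
def Claim_equal_container_balanced_py : Prop := ∀ (value : String), Dom_container_balanced_py value → Spec_container_balanced_py value (container_balanced_py value)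

-- ===== LEMMAS AND PROOFS =====

-- Inside a single-quoted region A's loop only watches escapes and '\''; this
-- is exactly skipQuoted.
theorem aLoop_single : ∀ (n : Nat) (l : List Char), l.length ≤ n → ∀ (sq cu : Int),
    aLoop l true false false sq cu =
      (match skipQuoted l '\'' with
       | none => (true, false, sq, cu)
       | some r => aLoop r false false false sq cu) := by
  intro n
  induction n with
  | zero =>
    intro l hl sq cu
    cases l with
    | nil => simp [aLoop, skipQuoted]
    | cons c rest => simp at hl
  | succ n ih =>
    intro l hl sq cu
    cases l with
    | nil => simp [aLoop, skipQuoted]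
    | cons c rest =>
      simp at hl
      by_cases h1 : c = '\\'
      · subst h1
        cases rest with
        | nil => simp [aLoop, skipQuoted]
        | cons c2 r2 =>
          have : r2.length ≤ n := by simp at hl; omega
          simp [aLoop, skipQuoted, ih r2 this sq cu]
      · by_cases h2 : c = '\''
        · subst h2
          simp [aLoop, skipQuoted]
        · simp [aLoop, skipQuoted, h1, h2, ih rest (by omega) sq cu]

-- Same for a double-quoted region.
theorem aLoop_double : ∀ (n : Nat) (l : List Char), l.length ≤ n → ∀ (sq cu : Int),
    aLoop l false true false sq cu =
      (match skipQuoted l '"' with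
       | none => (false, true, sq, cu)
       | some r => aLoop r false false false sq cu) := by
  intro n
  induction n with
  | zero =>
    intro l hl sq cu
    cases l with
    | nil => simp [aLoop, skipQuoted]
    | cons c rest => simp at hl
  | succ n ih =>
    intro l hl sq cu
    cases l with
    | nil => simp [aLoop, skipQuoted]
    | cons c rest =>
      simp at hl
      by_cases h1 : c = '\\'
      · subst h1
        cases rest with
        | nil => simp [aLoop, skipQuoted]
        | cons c2 r2 =>
          have : r2.length ≤ n := by simp at hl; omega
          simp [aLoop, skipQuoted, ih r2 this sq cu]
      · by_cases h2 : c = '"'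
        · subst h2
          simp [aLoop, skipQuoted]
        · simp [aLoop, skipQuoted, h1, h2, ih rest (by omega) sq cu]

-- Main equivalence of the two loops, from the neutral state.
theorem main_loop : ∀ (n : Nat) (l : List Char), l.length ≤ n → ∀ (sq cu : Int),
    (let r := aLoop l false false false sq cu
     (r.2.2.1 == 0 && r.2.2.2 == 0 && !r.1 && !r.2.1)) = bOuter l sq cu := by
  intro n
  induction n with
  | zero =>
    intro l hl sq cu
    cases l with
    | nil => simp [aLoop, bOuter]
    | cons c rest => simp at hl
  | succ n ih =>
    intro l hl sq cu
    cases l with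
    | nil => simp [aLoop, bOuter]
    | cons c rest =>
      simp at hl
      by_cases h1 : c = '\\'
      · subst h1
        cases rest with
        | nil => simp [aLoop, bOuter]
        | cons c2 r2 =>
          have : r2.length ≤ n := by simp at hl; omega
          simp [aLoop, bOuter, ih r2 this sq cu]
      · by_cases h2 : c = '\''
        · subst h2
          have hr : rest.length ≤ n := by omega
          have hA : aLoop ('\'' :: rest) false false false sq cu
              = aLoop rest true false false sq cu := by simp [aLoop]
          cases hs : skipQuoted rest '\'' with
          | none =>
            have hB : bOuter ('\'' :: rest) sq cu = false := by
              simp only [bOuter]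
              split <;> simp_all
              split <;> simp_all
            simp only [hA, hB, aLoop_single rest.length rest le_rfl sq cu, hs]
            simp
          | some r =>
            have hB : bOuter ('\'' :: rest) sq cu = bOuter r sq cu := by
              simp only [bOuter]
              split <;> simp_all
              split <;> simp_all
            have : r.length ≤ n := le_trans (skipQuoted_length rest '\'' r hs) hr
            simp only [hA, hB, aLoop_single rest.length rest le_rfl sq cu, hs]
            simpa using ih r this sq cu
        · by_cases h3 : c = '"'
          · subst h3
            have hr : rest.length ≤ n := by omega
            have hA : aLoop ('"' :: rest) false false false sq cu
                = aLoop rest false true false sq cu := by simp [aLoop]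
            cases hs : skipQuoted rest '"' with
            | none =>
              have hB : bOuter ('"' :: rest) sq cu = false := by
                simp only [bOuter]
                split <;> simp_all
                split <;> simp_all
              simp only [hA, hB, aLoop_double rest.length rest le_rfl sq cu, hs]
              simp
            | some r =>
              have hB : bOuter ('"' :: rest) sq cu = bOuter r sq cu := by
                simp only [bOuter]
                split <;> simp_all
                split <;> simp_all
              have : r.length ≤ n := le_trans (skipQuoted_length rest '"' r hs) hr
              simp only [hA, hB, aLoop_double rest.length rest le_rfl sq cu, hs]
              simpa using ih r this sq cu
          · have hr : rest.length ≤ n := by omega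
            by_cases h4 : c = '['
            · subst h4; simp [aLoop, bOuter, ih rest hr]
            · by_cases h5 : c = ']'
              · subst h5; simp [aLoop, bOuter, ih rest hr]
              · by_cases h6 : c = '{'
                · subst h6; simp [aLoop, bOuter, ih rest hr]
                · by_cases h7 : c = '}'
                  · subst h7; simp [aLoop, bOuter, ih rest hr]
                  · simp [aLoop, bOuter, h1, h2, h3, h4, h5, h6, h7, ih rest hr]

-- ===== VERDICT (by name: the statement is the Claim_ definition above) =====
theorem container_balanced_py_spec : Claim_equal_container_balanced_py := by
  intro value _
  unfold Spec_container_balanced_py container_balanced_py container_balanced_py_alt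
  exact main_loop value.toList.length value.toList le_rfl 0 0
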